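-- pv_equiv track=rewrite | github.com/rut31337/YamlForge | demobuilder/core/infrastructure_diagram.py | _should_instance_connect_to_network_diagram
-- ===== SOURCE A (Python) =====
-- from typing import Dict, List, Tuple, Any
--
-- def _should_instance_connect_to_network_diagram(instance_purpose: str, network: Dict) -> bool:
--     """Determine if an instance should connect to a network based on three-tier architecture security (diagram version)"""
--     network_type = network.get('type', '')
--     network_name = network.get('name', '').lower()
--
--     # For isolated networks (one per instance), always connect
--     if 'isolated' in network.get('description', '').lower():
--         return True
--
--     # For VPC networks, always connect
--     if network_type == 'vpc':
--         return True
--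
--     # Three-tier security rules with proper inter-tier connectivity:
--
--     # Web servers: Connect to public subnet (for internet) AND app subnet (to reach app servers)
--     if instance_purpose == 'web':
--         return network_type in ['public_subnet', 'app_subnet'] or any(x in network_name for x in ['public', 'app'])
--
--     # Load balancers: Public subnet only (internet-facing)
--     elif instance_purpose == 'loadbalancer':
--         return network_type == 'public_subnet' or 'public' in network_name
--
--     # Application servers: App subnet (primary) AND db subnet (to reach databases)
--     elif instance_purpose == 'application':
--         return network_type in ['app_subnet', 'db_subnet'] or any(x in network_name for x in ['app', 'db', 'database'])
--
--     # Database servers: Database subnet only (most restricted)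
--     elif instance_purpose == 'database':
--         return network_type == 'db_subnet' or any(x in network_name for x in ['db', 'database'])
--
--     # Legacy private subnet support (fallback for existing configs)
--     elif instance_purpose in ['application', 'database'] and network_type == 'private_subnet':
--         return True
--
--     # General purpose instances -> connect to any network (fallback)
--     else:
--         return True
-- ===== SOURCE B (Python) =====
-- _ALLOWED_TIERS = {'web': {0, 1}, 'loadbalancer': {0}, 'application': {1, 2}, 'database': {2}}
-- # tier 0 = public, 1 = app, 2 = db
-- _TIER_SIGNS = ((0, 'public_subnet', ('public',)), (1, 'app_subnet', ('app',)), (2, 'db_subnet', ('db', 'database')))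
--
-- def _should_instance_connect_to_network_diagram(instance_purpose, network):
--     if 'isolated' in network.get('description', '').lower():
--         return True
--     network_type = network.get('type', '')
--     if network_type == 'vpc':
--         return True
--     allowed = _ALLOWED_TIERS.get(instance_purpose)
--     if allowed is None:
--         return True
--     network_name = network.get('name', '').lower()
--     tiers = {t for t, typ, subs in _TIER_SIGNS
--              if network_type == typ or any(s in network_name for s in subs)}
--     return bool(tiers & allowed)
-- ===== Notes on version B (the rewrite author's own statement) =====
-- stated objective: alternative
-- what changed: Replaces the per-purpose if/elif chain of subnet-type/name-substring membership tests by a numeric tier model: the network is classified once into a set of tiers (0=public, 1=app, 2=db) from its type and name, and an instance connects iff that set intersects the purpose's allowed-tier set (unknown purposes and the isolated/vpc guards still default to True).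
import Mathlib
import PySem

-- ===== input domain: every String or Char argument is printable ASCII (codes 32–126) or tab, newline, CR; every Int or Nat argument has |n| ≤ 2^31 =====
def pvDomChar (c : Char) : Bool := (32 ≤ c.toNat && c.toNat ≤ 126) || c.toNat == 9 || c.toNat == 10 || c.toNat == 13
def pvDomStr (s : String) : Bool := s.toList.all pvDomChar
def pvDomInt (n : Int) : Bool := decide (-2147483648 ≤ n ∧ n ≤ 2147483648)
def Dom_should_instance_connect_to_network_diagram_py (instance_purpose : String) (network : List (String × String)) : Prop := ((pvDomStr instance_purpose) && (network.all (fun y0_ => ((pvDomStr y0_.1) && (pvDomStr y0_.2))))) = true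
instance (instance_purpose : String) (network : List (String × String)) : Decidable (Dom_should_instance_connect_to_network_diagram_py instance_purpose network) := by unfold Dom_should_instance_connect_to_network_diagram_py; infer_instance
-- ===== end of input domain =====

-- B: replaces A's per-purpose if/elif membership chain by a numeric tier model (0=public,1=app,2=db): compute the network's tier set once and intersect it with the purpose's allowed tiers (objective: alternative/simpler decomposition).


-- ===== PORT A =====
-- network.get(k, dflt) on the association list (first match)
def pvGetD (network : List (String × String)) (k dflt : String) : String :=
  match network.find? (fun p => p.1 == k) with
  | some p => p.2
  | none => dflt

def should_instance_connect_to_network_diagram_py (instance_purpose : String) (network : List (String × String)) : Bool :=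
  let network_type := pvGetD network "type" ""
  let network_name := PySem.Str.lower (pvGetD network "name" "")
  if PySem.Str.isIn "isolated" (PySem.Str.lower (pvGetD network "description" "")) then true
  else if network_type == "vpc" then true
  else if instance_purpose == "web" then
    (network_type == "public_subnet" || network_type == "app_subnet")
      || (["public", "app"].any (fun x => PySem.Str.isIn x network_name))
  else if instance_purpose == "loadbalancer" then
    network_type == "public_subnet" || PySem.Str.isIn "public" network_name
  else if instance_purpose == "application" then
    (network_type == "app_subnet" || network_type == "db_subnet")
      || (["app", "db", "database"].any (fun x => PySem.Str.isIn x network_name))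
  else if instance_purpose == "database" then
    network_type == "db_subnet" || (["db", "database"].any (fun x => PySem.Str.isIn x network_name))
  else if (instance_purpose == "application" || instance_purpose == "database")
            && network_type == "private_subnet" then true
  else true

-- ===== PORT B =====
-- tier 0 = public, 1 = app, 2 = db
def pvAllowedTiers : List (String × List Nat) :=
  [("web", [0, 1]), ("loadbalancer", [0]), ("application", [1, 2]), ("database", [2])]

def pvTierSigns : List (Nat × String × List String) :=
  [(0, "public_subnet", ["public"]), (1, "app_subnet", ["app"]), (2, "db_subnet", ["db", "database"])]

def should_instance_connect_to_network_diagram_py_alt (instance_purpose : String) (network : List (String × String)) : Bool :=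
  if PySem.Str.isIn "isolated" (PySem.Str.lower (pvGetD network "description" "")) then true
  else
    let network_type := pvGetD network "type" ""
    if network_type == "vpc" then true
    else
      match pvAllowedTiers.find? (fun p => p.1 == instance_purpose) with
      | none => true
      | some (_, allowed) =>
        let network_name := PySem.Str.lower (pvGetD network "name" "")
        let tiers := pvTierSigns.filterMap (fun ts =>
          if network_type == ts.2.1 || ts.2.2.any (fun s => PySem.Str.isIn s network_name)
          then some ts.1 else none)
        tiers.any (fun t => allowed.contains t)

-- ===== PRECONDITION & SPEC =====
def Spec_should_instance_connect_to_network_diagram_py (instance_purpose : String) (network : List (String × String)) (out : Bool) : Prop := out = should_instance_connect_to_network_diagram_py_alt instance_purpose network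
instance (instance_purpose : String) (network : List (String × String)) (out : Bool) : Decidable (Spec_should_instance_connect_to_network_diagram_py instance_purpose network out) := by unfold Spec_should_instance_connect_to_network_diagram_py; infer_instance

-- ===== CLAIM (what is proved, stated in full; the proofs are below) =====
def Claim_equal_should_instance_connect_to_network_diagram_py : Prop := ∀ (instance_purpose : String) (network : List (String × String)), Dom_should_instance_connect_to_network_diagram_py instance_purpose network → Spec_should_instance_connect_to_network_diagram_py instance_purpose network (should_instance_connect_to_network_diagram_py instance_purpose network)

-- ===== LEMMAS AND PROOFS =====
theorem pv_case_web (network : List (String × String)) :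
    should_instance_connect_to_network_diagram_py "web" network
      = should_instance_connect_to_network_diagram_py_alt "web" network := by
  unfold should_instance_connect_to_network_diagram_py should_instance_connect_to_network_diagram_py_alt
  simp [pvAllowedTiers, pvTierSigns]
  generalize PySem.Chars.isIn ['i','s','o','l','a','t','e','d'] (PySem.Chars.lower (pvGetD network "description" "").toList) = iso
  generalize pvGetD network "type" "" = t
  generalize (PySem.Chars.lower (pvGetD network "name" "").toList) = nm
  generalize PySem.Chars.isIn ['p','u','b','l','i','c'] nm = b0
  generalize PySem.Chars.isIn ['a','p','p'] nm = b1
  generalize PySem.Chars.isIn ['d','b'] nm = b2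
  generalize PySem.Chars.isIn ['d','a','t','a','b','a','s','e'] nm = b3
  cases iso <;> by_cases hv : t = "vpc" <;>
    by_cases h0 : t = "public_subnet" <;> by_cases h1 : t = "app_subnet" <;>
    by_cases h2 : t = "db_subnet" <;> cases b0 <;> cases b1 <;> cases b2 <;> cases b3 <;>
    simp_all

theorem pv_case_loadbalancer (network : List (String × String)) :
    should_instance_connect_to_network_diagram_py "loadbalancer" network
      = should_instance_connect_to_network_diagram_py_alt "loadbalancer" network := by
  unfold should_instance_connect_to_network_diagram_py should_instance_connect_to_network_diagram_py_alt
  simp [pvAllowedTiers, pvTierSigns]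
  generalize PySem.Chars.isIn ['i','s','o','l','a','t','e','d'] (PySem.Chars.lower (pvGetD network "description" "").toList) = iso
  generalize pvGetD network "type" "" = t
  generalize (PySem.Chars.lower (pvGetD network "name" "").toList) = nm
  generalize PySem.Chars.isIn ['p','u','b','l','i','c'] nm = b0
  generalize PySem.Chars.isIn ['a','p','p'] nm = b1
  generalize PySem.Chars.isIn ['d','b'] nm = b2
  generalize PySem.Chars.isIn ['d','a','t','a','b','a','s','e'] nm = b3
  cases iso <;> by_cases hv : t = "vpc" <;>
    by_cases h0 : t = "public_subnet" <;> by_cases h1 : t = "app_subnet" <;>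
    by_cases h2 : t = "db_subnet" <;> cases b0 <;> cases b1 <;> cases b2 <;> cases b3 <;>
    simp_all

theorem pv_case_application (network : List (String × String)) :
    should_instance_connect_to_network_diagram_py "application" network
      = should_instance_connect_to_network_diagram_py_alt "application" network := by
  unfold should_instance_connect_to_network_diagram_py should_instance_connect_to_network_diagram_py_alt
  simp [pvAllowedTiers, pvTierSigns]
  generalize PySem.Chars.isIn ['i','s','o','l','a','t','e','d'] (PySem.Chars.lower (pvGetD network "description" "").toList) = iso
  generalize pvGetD network "type" "" = t
  generalize (PySem.Chars.lower (pvGetD network "name" "").toList) = nm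
  generalize PySem.Chars.isIn ['p','u','b','l','i','c'] nm = b0
  generalize PySem.Chars.isIn ['a','p','p'] nm = b1
  generalize PySem.Chars.isIn ['d','b'] nm = b2
  generalize PySem.Chars.isIn ['d','a','t','a','b','a','s','e'] nm = b3
  cases iso <;> by_cases hv : t = "vpc" <;>
    by_cases h0 : t = "public_subnet" <;> by_cases h1 : t = "app_subnet" <;>
    by_cases h2 : t = "db_subnet" <;> cases b0 <;> cases b1 <;> cases b2 <;> cases b3 <;>
    simp_all

theorem pv_case_database (network : List (String × String)) :
    should_instance_connect_to_network_diagram_py "database" network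
      = should_instance_connect_to_network_diagram_py_alt "database" network := by
  unfold should_instance_connect_to_network_diagram_py should_instance_connect_to_network_diagram_py_alt
  simp [pvAllowedTiers, pvTierSigns]
  generalize PySem.Chars.isIn ['i','s','o','l','a','t','e','d'] (PySem.Chars.lower (pvGetD network "description" "").toList) = iso
  generalize pvGetD network "type" "" = t
  generalize (PySem.Chars.lower (pvGetD network "name" "").toList) = nm
  generalize PySem.Chars.isIn ['p','u','b','l','i','c'] nm = b0
  generalize PySem.Chars.isIn ['a','p','p'] nm = b1
  generalize PySem.Chars.isIn ['d','b'] nm = b2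
  generalize PySem.Chars.isIn ['d','a','t','a','b','a','s','e'] nm = b3
  cases iso <;> by_cases hv : t = "vpc" <;>
    by_cases h0 : t = "public_subnet" <;> by_cases h1 : t = "app_subnet" <;>
    by_cases h2 : t = "db_subnet" <;> cases b0 <;> cases b1 <;> cases b2 <;> cases b3 <;>
    simp_all


-- ===== VERDICT (by name: the statement is the Claim_ definition above) =====
theorem should_instance_connect_to_network_diagram_py_spec : Claim_equal_should_instance_connect_to_network_diagram_py := by
  intro ip network _
  unfold Spec_should_instance_connect_to_network_diagram_py
  by_cases hw : ip = "web"
  · subst hw; exact pv_case_web network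
  · by_cases hl : ip = "loadbalancer"
    · subst hl; exact pv_case_loadbalancer network
    · by_cases ha : ip = "application"
      · subst ha; exact pv_case_application network
      · by_cases hd : ip = "database"
        · subst hd; exact pv_case_database network
        · unfold should_instance_connect_to_network_diagram_py should_instance_connect_to_network_diagram_py_alt
          have ew : (ip == "web") = false := by simp [hw]
          have el : (ip == "loadbalancer") = false := by simp [hl]
          have ea : (ip == "application") = false := by simp [ha]
          have ed : (ip == "database") = false := by simp [hd]
          have fw : ("web" == ip) = false := by simp [Ne.symm hw]
          have fl : ("loadbalancer" == ip) = false := by simp [Ne.symm hl]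
          have fa : ("application" == ip) = false := by simp [Ne.symm ha]
          have fd : ("database" == ip) = false := by simp [Ne.symm hd]
          simp [pvAllowedTiers, List.find?, ew, el, ea, ed, fw, fl, fa, fd]
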